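-- pv_equiv track=rewrite | github.com/dth2701/Leetcode-Tracking | TIP102/Unit 2: Dictionaries/s2Advanced.py | find_balanced_subsequence
-- ===== SOURCE A (Python) =====
-- def find_balanced_subsequence(art_pieces):
--     # Base case: If all values are the same, there's no balanced subsequence
--
--     if len(set(art_pieces)) == 1:
--         return 0
--     # {1, 2, 3, 5, 7}
--     count = {}
--     for piece in art_pieces:
--         count[piece] = 1 + count.get(piece, 0)
--
--     # Check each potential pair
--     max_length = 0
--     for value in count:
--         if value + 1 in count:
--             max_length = max(max_length, count[value] + count[value + 1])
--     return max_length
-- ===== SOURCE B (Python) =====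
-- def find_balanced_subsequence(art_pieces):
--     # run-length encode the sorted list; consecutive values can only be adjacent runs
--     runs = []
--     for x in sorted(art_pieces):
--         if runs and runs[-1][0] == x:
--             runs[-1] = (x, runs[-1][1] + 1)
--         else:
--             runs.append((x, 1))
--     best = 0
--     for (v, c), (w, d) in zip(runs, runs[1:]):
--         if w == v + 1:
--             best = max(best, c + d)
--     return best
-- ===== Notes on version B (the rewrite author's own statement) =====
-- stated objective: alternative
-- what changed: Replaces A's counter dict plus key-membership loop by sorting the list, run-length encoding it, and testing only adjacent runs for consecutive values.
import Mathlib
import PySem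

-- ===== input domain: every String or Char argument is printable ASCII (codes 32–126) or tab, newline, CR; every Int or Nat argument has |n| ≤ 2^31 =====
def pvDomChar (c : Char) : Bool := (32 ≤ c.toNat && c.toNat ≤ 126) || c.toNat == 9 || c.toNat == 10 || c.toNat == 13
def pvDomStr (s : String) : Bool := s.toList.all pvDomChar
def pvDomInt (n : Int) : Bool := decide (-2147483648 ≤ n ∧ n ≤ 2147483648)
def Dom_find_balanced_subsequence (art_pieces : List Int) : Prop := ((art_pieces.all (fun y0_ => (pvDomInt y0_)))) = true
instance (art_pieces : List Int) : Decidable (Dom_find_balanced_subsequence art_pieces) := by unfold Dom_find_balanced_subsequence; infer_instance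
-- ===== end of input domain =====

-- B replaces A's counter dict and key-membership loop by sorting the list, run-length encoding it,
-- and testing only adjacent runs for consecutive values; same result by a different algorithm.

-- ===== PORT A =====
def find_balanced_subsequence (art_pieces : List Int) : Int :=
  if PySem.Set.len (PySem.Set.ofList art_pieces) == 1 then 0
  else
    let count := art_pieces.foldl (fun d piece => d.insert piece (1 + d.getD piece 0)) PySem.Dict.empty
    count.keys.foldl (fun max_length value =>
      if count.contains (value + 1) then
        max max_length (count.getD value 0 + count.getD (value + 1) 0)
      else max_length) 0

-- ===== PORT B =====
-- the body of Source B's first loop: extend the last run or start a new one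
def rleStep (runs : List (Int × Int)) (x : Int) : List (Int × Int) :=
  match runs.getLast? with
  | some p => if p.1 == x then runs.dropLast ++ [(x, p.2 + 1)] else runs ++ [(x, 1)]
  | none => [(x, 1)]

-- Source B's first loop: run-length encoding of s
def rle (s : List Int) : List (Int × Int) := s.foldl rleStep []

def find_balanced_subsequence_alt (art_pieces : List Int) : Int :=
  let runs := rle (PySem.List.sorted art_pieces (fun x => x))
  (runs.zip (runs.drop 1)).foldl (fun best p =>
    if p.2.1 == p.1.1 + 1 then max best (p.1.2 + p.2.2) else best) 0

-- ===== PRECONDITION & SPEC =====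
def Spec_find_balanced_subsequence (art_pieces : List Int) (out : Int) : Prop := out = find_balanced_subsequence_alt art_pieces
instance (art_pieces : List Int) (out : Int) : Decidable (Spec_find_balanced_subsequence art_pieces out) := by unfold Spec_find_balanced_subsequence; infer_instance

-- ===== CLAIM (what is proved, stated in full; the proofs are below) =====
def Claim_equal_find_balanced_subsequence : Prop := ∀ (art_pieces : List Int), Dom_find_balanced_subsequence art_pieces → Spec_find_balanced_subsequence art_pieces (find_balanced_subsequence art_pieces)

-- ===== LEMMAS AND PROOFS =====

-- a 'running max under a test' loop is the plain max-fold of the filtered, mapped list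
theorem ite_max_fold {α : Type} (l : List α) (p : α → Bool) (f : α → Int) (i : Int) :
    l.foldl (fun a x => if p x then max a (f x) else a) i
      = ((l.filter p).map f).foldl max i := by
  induction l generalizing i with
  | nil => rfl
  | cons x t ih =>
    by_cases h : p x = true <;> simp [h, ih]

theorem maxfold_le_of_subset (l₁ l₂ : List Int) (h : ∀ x ∈ l₁, x ∈ l₂) :
    l₁.foldl max 0 ≤ l₂.foldl max 0 := by
  rcases PySem.List.foldl_max_mem l₁ 0 with h0 | hm
  · rw [h0]; exact (PySem.List.le_foldl_max l₂ 0).1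
  · exact (PySem.List.le_foldl_max l₂ 0).2 _ (h _ hm)

theorem maxfold_eq_of_mem_iff (l₁ l₂ : List Int) (h : ∀ x, x ∈ l₁ ↔ x ∈ l₂) :
    l₁.foldl max 0 = l₂.foldl max 0 :=
  le_antisymm (maxfold_le_of_subset l₁ l₂ fun x hx => (h x).mp hx)
    (maxfold_le_of_subset l₂ l₁ fun x hx => (h x).mpr hx)

-- both components of an adjacent pair are members
theorem mem_of_mem_zip_drop1 {α : Type} (l : List α) :
    ∀ p ∈ l.zip (l.drop 1), p.1 ∈ l ∧ p.2 ∈ l := by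
  induction l with
  | nil => intro p hp; simp at hp
  | cons a t ih =>
    intro p hp
    cases t with
    | nil => simp at hp
    | cons b t' =>
      simp only [List.drop_one, List.tail_cons, List.zip_cons_cons, List.mem_cons] at hp
      rcases hp with h | h
      · subst h; simp
      · have := ih p (by simpa using h)
        exact ⟨List.mem_cons_of_mem _ this.1, List.mem_cons_of_mem _ this.2⟩

-- in a strictly increasing list, v and v+1 both present are adjacent
theorem adj_of_mem (l : List Int) (hp : l.Pairwise (· < ·)) (v : Int)
    (hv : v ∈ l) (hw : v + 1 ∈ l) : (v, v + 1) ∈ l.zip (l.drop 1) := by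
  induction l with
  | nil => simp at hv
  | cons a t ih =>
    have hpt := (List.pairwise_cons.mp hp).2
    have hlt := (List.pairwise_cons.mp hp).1
    rcases List.mem_cons.mp hv with rfl | hv'
    · -- v = a, v+1 ∈ t
      have hw' : v + 1 ∈ t := by
        rcases List.mem_cons.mp hw with h | h
        · omega
        · exact h
      cases t with
      | nil => simp at hw'
      | cons b t' =>
        have hb : v < b := hlt b (by simp)
        have hbeq : b = v + 1 := by
          rcases List.mem_cons.mp hw' with h | h
          · omega
          · have : b < v + 1 := (List.pairwise_cons.mp hpt).1 _ h
            omega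
        subst hbeq
        simp [List.zip_cons_cons]
    · -- v ∈ t
      have hva : a < v := hlt v hv'
      have hw' : v + 1 ∈ t := by
        rcases List.mem_cons.mp hw with h | h
        · omega
        · exact h
      cases t with
      | nil => simp at hv'
      | cons b t' =>
        have htl := ih hpt hv' hw'
        simp only [List.drop_one, List.tail_cons, List.zip_cons_cons, List.mem_cons]
        right
        simpa using htl

-- run-length encoding of a sorted list: run values strictly increase, cover exactly the
-- members, run lengths are the occurrence counts, the last run carries the maximum
theorem rle_spec (s : List Int) (hs : s.Pairwise (· ≤ ·)) :
    ((rle s).map Prod.fst).Pairwise (· < ·)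
    ∧ (∀ v : Int, v ∈ (rle s).map Prod.fst ↔ v ∈ s)
    ∧ (∀ p ∈ rle s, p.2 = (s.count p.1 : Int))
    ∧ (∀ q : Int × Int, (rle s).getLast? = some q → ∀ y ∈ s, y ≤ q.1) := by
  induction s using List.reverseRecOn with
  | nil => refine ⟨by simp [rle], by simp [rle], by simp [rle], by simp [rle]⟩
  | append_singleton l x ih =>
    have hsl : l.Pairwise (· ≤ ·) := (List.pairwise_append.mp hs).1
    have hle : ∀ y ∈ l, y ≤ x := fun y hy =>
      (List.pairwise_append.mp hs).2.2 y hy x (by simp)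
    obtain ⟨h1, h2, h3, h4⟩ := ih hsl
    have hrle : rle (l ++ [x]) = rleStep (rle l) x := by
      simp [rle, List.foldl_append]
    cases hlast : (rle l).getLast? with
    | none =>
      have hnil : rle l = [] := List.getLast?_eq_none_iff.mp hlast
      have hlnil : l = [] := by
        by_contra h
        obtain ⟨y, hy⟩ := List.exists_mem_of_ne_nil l h
        have := (h2 y).mpr hy
        simp [hnil] at this
      subst hlnil
      refine ⟨?_, ?_, ?_, ?_⟩ <;> simp [rle, rleStep]
    | some q =>
      obtain ⟨l', hl'⟩ := List.getLast?_eq_some_iff.mp hlast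
      have hqmem : q ∈ rle l := by rw [hl']; simp
      have hdrop : (rle l).dropLast = l' := by rw [hl']; simp
      by_cases hqx : q.1 = x
      · -- extend the last run
        have hx_mem_l : x ∈ l := (h2 x).mp (by rw [hl']; simp [← hqx])
        have hnew : rle (l ++ [x]) = l' ++ [(x, q.2 + 1)] := by
          rw [hrle]; simp [rleStep, hlast, hqx, hdrop]
        have hmapeq : (l' ++ [(x, q.2 + 1)]).map Prod.fst = (rle l).map Prod.fst := by
          rw [hl', ← hqx]; simp
        refine ⟨?_, ?_, ?_, ?_⟩
        · rw [hnew, hmapeq]; exact h1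
        · intro v
          rw [hnew, hmapeq, h2]
          simp only [List.mem_append, List.mem_singleton]
          constructor
          · intro h; exact Or.inl h
          · rintro (h | rfl)
            · exact h
            · exact hx_mem_l
        · intro p hp
          rw [hnew] at hp
          rcases List.mem_append.mp hp with hp' | hp'
          · have hpin : p ∈ rle l := by rw [hl']; exact List.mem_append_left _ hp'
            have hplt : p.1 < x := by
              have : ((rle l).map Prod.fst).Pairwise (· < ·) := h1
              rw [hl'] at this
              simp only [List.map_append, List.pairwise_append] at this
              have := this.2.2 p.1 (List.mem_map_of_mem hp') q.1 (by simp)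
              omega
            have hpx : p.1 ≠ x := by omega
            rw [List.count_append, List.count_singleton]
            simp only [beq_iff_eq]
            rw [if_neg (by exact fun h => hpx h.symm)]
            simpa using h3 p hpin
          · have hp2 : p = (x, q.2 + 1) := by simpa using hp'
            subst hp2
            have hq2 : q.2 = (l.count q.1 : Int) := h3 q hqmem
            rw [List.count_append, List.count_singleton]
            simp only [beq_self_eq_true, if_pos]
            rw [hqx] at hq2
            push_cast
            omega
        · intro r hr y hy
          rw [hnew] at hr
          rw [List.getLast?_concat, Option.some_inj] at hr
          subst hr
          rcases List.mem_append.mp hy with h | h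
          · exact hle y h
          · simp at h; omega
      · -- start a new run
        have hq1l : q.1 ∈ l := (h2 q.1).mp (by rw [hl']; simp)
        have hxl : x ∉ l := by
          intro hx
          have h1x : x ≤ q.1 := h4 q hlast x hx
          have h2x : q.1 ≤ x := hle _ hq1l
          omega
        have hnew : rle (l ++ [x]) = rle l ++ [(x, 1)] := by
          rw [hrle]; simp [rleStep, hlast, hqx]
        refine ⟨?_, ?_, ?_, ?_⟩
        · rw [hnew]
          simp only [List.map_append, List.pairwise_append]
          refine ⟨h1, by simp, ?_⟩
          intro a ha b hb
          have hb' : b = x := by simpa using hb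
          have hal : a ∈ l := (h2 a).mp ha
          have hax : a ≤ x := hle a hal
          have hanex : a ≠ x := fun h => hxl (h ▸ hal)
          omega
        · intro v
          rw [hnew]
          simp only [List.map_append, List.mem_append, List.map_cons, List.map_nil,
            List.mem_singleton, h2]
        · intro p hp
          rw [hnew] at hp
          rcases List.mem_append.mp hp with hp' | hp'
          · have hpl : p.1 ∈ l := (h2 p.1).mp (List.mem_map_of_mem hp')
            have hpx : p.1 ≠ x := fun h => hxl (h ▸ hpl)
            rw [List.count_append, List.count_singleton]
            simp only [beq_iff_eq]
            rw [if_neg (by exact fun h => hpx h.symm)]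
            simpa using h3 p hp'
          · have hp2 : p = (x, 1) := by simpa using hp'
            subst hp2
            rw [List.count_append, List.count_singleton]
            simp only [beq_self_eq_true, if_pos]
            rw [List.count_eq_zero.mpr hxl]
            rfl
        · intro r hr y hy
          rw [hnew] at hr
          rw [List.getLast?_concat, Option.some_inj] at hr
          subst hr
          rcases List.mem_append.mp hy with h | h
          · exact hle y h
          · simp at h; omega

-- ===== VERDICT (by name: the statement is the Claim_ definition above) =====
theorem find_balanced_subsequence_spec : Claim_equal_find_balanced_subsequence := by
  intro art _
  unfold Spec_find_balanced_subsequence find_balanced_subsequence find_balanced_subsequence_alt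
  set K := PySem.Set.ofList art with hK
  set s := PySem.List.sorted art (fun x => x) with hs
  set R := rle s with hR
  set F := R.map Prod.fst with hF
  have hspar : s.Pairwise (· ≤ ·) := by
    rw [hs]; exact PySem.List.sorted_pairwise art (fun x => x)
  obtain ⟨hF1, hF2, hF3, _⟩ := rle_spec s hspar
  have hmemF : ∀ x : Int, x ∈ F ↔ x ∈ art := by
    intro x
    rw [hF, hF2, hs, PySem.List.mem_sorted]
  have hcnt : ∀ v : Int, s.count v = art.count v := fun v =>
    (PySem.List.sorted_perm art (fun x => x) false).count_eq v
  -- rewrite A's dict loop into the counter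
  have hfun : (fun (d : PySem.Dict Int Int) piece => d.insert piece (1 + d.getD piece 0))
      = (fun d x => d.insert x (d.getD x 0 + 1)) := by
    funext d x; rw [Int.add_comm]
  rw [hfun, PySem.Dict.foldl_insert_getD_add_one_eq_counter]
  simp only [PySem.Dict.keys_counter, PySem.Dict.contains_counter, PySem.Dict.getD_counter]
  -- pairs of adjacent runs project to pairs of adjacent run values
  have hzipmap : F.zip (F.drop 1) = (R.zip (R.drop 1)).map (Prod.map Prod.fst Prod.fst) := by
    rw [hF, ← List.map_drop, List.zip_map]
  by_cases hone : PySem.Set.len K == 1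
  · -- all values equal: a single run, no adjacent pair
    simp only [hone, if_true]
    have hKlen : K.length = 1 := by
      have h1 : PySem.Set.len K = 1 := by simpa using hone
      simp only [PySem.Set.len] at h1
      omega
    have hndF : F.Nodup := hF1.imp (fun h => LT.lt.ne h)
    have hperm : F.Perm K := (List.perm_ext_iff_of_nodup hndF (PySem.Set.nodup_ofList art)).mpr
      (fun a => (hmemF a).trans ((PySem.Set.mem_ofList art a)).symm)
    have hRlen : R.length = 1 := by
      have := hperm.length_eq
      rw [hF, List.length_map] at this
      omega
    obtain ⟨r, hr⟩ := List.length_eq_one_iff.mp hRlen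
    rw [hr]
    rfl
  · simp only [hone]
    rw [ite_max_fold, ite_max_fold]
    apply maxfold_eq_of_mem_iff
    intro x
    simp only [List.mem_map, List.mem_filter, beq_iff_eq]
    constructor
    · -- A's candidate is one of B's
      rintro ⟨v, ⟨hvK, hv1⟩, rfl⟩
      have hv1' : v + 1 ∈ art := by simpa using hv1
      have hvA : v ∈ art := (PySem.Set.mem_ofList art v).mp (by rw [← hK]; exact hvK)
      have hadj : (v, v + 1) ∈ F.zip (F.drop 1) :=
        adj_of_mem F hF1 v ((hmemF v).mpr hvA) ((hmemF (v + 1)).mpr hv1')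
      rw [hzipmap] at hadj
      obtain ⟨p, hpz, hpe⟩ := List.mem_map.mp hadj
      have hp1 : p.1.1 = v := congrArg Prod.fst hpe
      have hp2 : p.2.1 = v + 1 := congrArg Prod.snd hpe
      have hm := mem_of_mem_zip_drop1 R p hpz
      refine ⟨p, ⟨hpz, by rw [hp1, hp2]⟩, ?_⟩
      rw [hF3 p.1 hm.1, hF3 p.2 hm.2, hp1, hp2, hcnt, hcnt]
    · -- B's candidate is one of A's
      rintro ⟨p, ⟨hpz, hpe⟩, rfl⟩
      have hm := mem_of_mem_zip_drop1 R p hpz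
      have h1 : p.1.1 ∈ art := (hmemF p.1.1).mp (List.mem_map_of_mem hm.1)
      have h2 : p.1.1 + 1 ∈ art := by
        have := (hmemF p.2.1).mp (List.mem_map_of_mem hm.2)
        rwa [hpe] at this
      refine ⟨p.1.1, ⟨(PySem.Set.mem_ofList art p.1.1).mpr h1, by simpa using h2⟩, ?_⟩
      rw [hF3 p.1 hm.1, hF3 p.2 hm.2, hpe, hcnt, hcnt]
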